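-- pv_equiv track=rewrite | github.com/arlindolins/Otimizando-Domino | domino_v3.py | calcular_pontuacao_travamento
-- ===== SOURCE A (Python) =====
-- def calcular_pontuacao_travamento(maos):
--     soma_maos = {j: sum(p[0] + p[1] for p in mao) for j, mao in maos.items()}
--     vencedor = min(soma_maos, key=soma_maos.get)
--     menores = [j for j, s in soma_maos.items() if s == soma_maos[vencedor]]
--     if len(menores) > 1:
--         return None, 0
--     else:
--         return vencedor, 1
-- ===== SOURCE B (Python) =====
-- def calcular_pontuacao_travamento(maos):
--     best_player = None
--     best_sum = None
--     tie_count = 0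
--     for j, mao in maos.items():
--         s = sum(p[0] + p[1] for p in mao)
--         if best_sum is None or s < best_sum:
--             best_player, best_sum, tie_count = j, s, 1
--         elif s == best_sum:
--             tie_count += 1
--     if best_sum is None:
--         return None, 0
--     return (None, 0) if tie_count > 1 else (best_player, 1)
-- ===== Notes on version B (the rewrite author's own statement) =====
-- stated objective: alternative
-- what changed: Replaces A's three passes (dict comprehension of sums, min over the dict with a get-key, then a filter collecting all minimal players) by a single pass over maos.items() maintaining best_player/best_sum/tie_count; Pre_ excludes the empty dict (A's min() raises ValueError) and association lists with duplicate keys, which no Python dict argument can produce.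
-- outside the precondition, e.g. on calcular_pontuacao_travamento({}): A raises ValueError, B returns (None, 0)
-- crash fix: On the empty dict A's min() raises ValueError while B naturally returns (None, 0). — e.g. on calcular_pontuacao_travamento([]): A raises ValueError, B returns (none, 0)
import Mathlib
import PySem

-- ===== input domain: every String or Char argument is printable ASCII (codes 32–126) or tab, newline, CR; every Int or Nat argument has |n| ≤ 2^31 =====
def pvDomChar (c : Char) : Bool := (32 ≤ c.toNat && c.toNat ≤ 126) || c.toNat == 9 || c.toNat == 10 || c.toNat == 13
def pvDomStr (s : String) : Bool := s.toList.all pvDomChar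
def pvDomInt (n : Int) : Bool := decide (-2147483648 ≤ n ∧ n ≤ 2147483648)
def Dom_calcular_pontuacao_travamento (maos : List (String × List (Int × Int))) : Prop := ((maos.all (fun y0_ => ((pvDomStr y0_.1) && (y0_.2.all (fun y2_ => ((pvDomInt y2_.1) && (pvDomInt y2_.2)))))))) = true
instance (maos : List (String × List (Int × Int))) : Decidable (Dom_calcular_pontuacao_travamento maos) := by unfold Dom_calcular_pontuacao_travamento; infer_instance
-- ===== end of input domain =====

-- B replaces A's three passes (sum dict, min with get-key, filter of minimal players) by one pass
-- keeping best player/sum and a tie count; same return value on every admitted input.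

-- ===== PORT A =====
-- sum(p[0] + p[1] for p in mao), shared by both ports (identical expression in both Pythons)
def pvHandSum (mao : List (Int × Int)) : Int :=
  mao.foldl (fun s p => s + (p.1 + p.2)) 0

def calcular_pontuacao_travamento (maos : List (String × List (Int × Int))) : Option String × Int :=
  let soma_maos : PySem.Dict String Int :=
    maos.foldl (fun d jm => d.insert jm.1 (pvHandSum jm.2)) PySem.Dict.empty
  match PySem.List.min? soma_maos.keys (fun j => soma_maos.getD j 0) with
  | none => (none, 0)  -- min() of an empty dict raises ValueError in Python: excluded by Pre_
  | some vencedor =>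
    -- soma_maos[vencedor] never raises KeyError: vencedor is a key of soma_maos
    let menores := ((soma_maos.items).filter
        (fun js => js.2 == soma_maos.getD vencedor 0)).map (fun js => js.1)
    if menores.length > 1 then (none, 0) else (some vencedor, 1)

-- ===== PORT B =====
def calcular_pontuacao_travamento_alt (maos : List (String × List (Int × Int))) : Option String × Int :=
  let st := maos.foldl (fun st jm =>
      let s := pvHandSum jm.2
      match st with
      | (none, _) => (some (jm.1, s), (1 : Int))
      | (some b, t) =>
        if s < b.2 then (some (jm.1, s), 1)
        else if s == b.2 then (some b, t + 1)
        else (some b, t))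
    ((none : Option (String × Int)), (0 : Int))
  match st with
  | (none, _) => (none, 0)
  | (some b, t) => if t > 1 then (none, 0) else (some b.1, 1)

-- ===== PRECONDITION & SPEC =====
-- Pre_ excludes (1) the empty dict, on which A's min() raises ValueError, and (2) association
-- lists with duplicate keys, which correspond to no Python dict argument at all.
def Pre_calcular_pontuacao_travamento (maos : List (String × List (Int × Int))) : Prop :=
  maos ≠ [] ∧ (maos.map (fun jm => jm.1)).Nodup
instance (maos : List (String × List (Int × Int))) : Decidable (Pre_calcular_pontuacao_travamento maos) := by unfold Pre_calcular_pontuacao_travamento; infer_instance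

def pvWitness_calcular_pontuacao_travamento : (List (String × List (Int × Int))) :=
  [("a", [(1, 2), (0, 3)]), ("b", [(2, 2)])]

-- On the empty dict A's min() raises ValueError while B naturally returns (None, 0).
def Raises_calcular_pontuacao_travamento (maos : List (String × List (Int × Int))) : Prop :=
  maos = []
instance (maos : List (String × List (Int × Int))) : Decidable (Raises_calcular_pontuacao_travamento maos) := by unfold Raises_calcular_pontuacao_travamento; infer_instance
def pvRaiseWitness_calcular_pontuacao_travamento : (List (String × List (Int × Int))) := []
def pvRaiseWitnessOut_calcular_pontuacao_travamento : Option String × Int := (none, 0)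

def Spec_calcular_pontuacao_travamento (maos : List (String × List (Int × Int))) (out : Option String × Int) : Prop := out = calcular_pontuacao_travamento_alt maos
instance (maos : List (String × List (Int × Int))) (out : Option String × Int) : Decidable (Spec_calcular_pontuacao_travamento maos out) := by unfold Spec_calcular_pontuacao_travamento; infer_instance

-- ===== CLAIM (what is proved, stated in full; the proofs are below) =====
def Claim_equal_calcular_pontuacao_travamento : Prop := ∀ (maos : List (String × List (Int × Int))), Dom_calcular_pontuacao_travamento maos → Pre_calcular_pontuacao_travamento maos → Spec_calcular_pontuacao_travamento maos (calcular_pontuacao_travamento maos)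
def Claim_raises_calcular_pontuacao_travamento : Prop := (∀ (maos : List (String × List (Int × Int))), Dom_calcular_pontuacao_travamento maos → Raises_calcular_pontuacao_travamento maos → ¬ Pre_calcular_pontuacao_travamento maos) ∧ (Dom_calcular_pontuacao_travamento (pvRaiseWitness_calcular_pontuacao_travamento) ∧ Raises_calcular_pontuacao_travamento (pvRaiseWitness_calcular_pontuacao_travamento) ∧ calcular_pontuacao_travamento_alt (pvRaiseWitness_calcular_pontuacao_travamento) = pvRaiseWitnessOut_calcular_pontuacao_travamento)

-- ===== LEMMAS AND PROOFS =====

-- the (player, hand-sum) pairs both programs work with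
def pvPairs (maos : List (String × List (Int × Int))) : List (String × Int) :=
  maos.map (fun jm => (jm.1, pvHandSum jm.2))

-- the dict of sums A builds
def pvD (maos : List (String × List (Int × Int))) : PySem.Dict String Int :=
  maos.foldl (fun d jm => d.insert jm.1 (pvHandSum jm.2)) PySem.Dict.empty

-- one step of Python's min()-fold on pairs, keyed by the sum
def pvPStep : Option (String × Int) → (String × Int) → Option (String × Int) :=
  fun a p => match a with
  | none => some p
  | some m => if p.2 < m.2 then some p else some m

-- one step of B's loop, on pairs
def pvG : Option (String × Int) × Int → (String × Int) → Option (String × Int) × Int :=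
  fun st p => match st with
  | (none, _) => (some p, (1 : Int))
  | (some b, t) =>
    if p.2 < b.2 then (some p, 1)
    else if p.2 == b.2 then (some b, t + 1)
    else (some b, t)

lemma pv_a_eq (maos : List (String × List (Int × Int))) :
    calcular_pontuacao_travamento maos =
      (match PySem.List.min? (pvD maos).keys (fun j => (pvD maos).getD j 0) with
       | none => (none, 0)
       | some vencedor =>
         if ((((pvD maos).items).filter
              (fun js => js.2 == (pvD maos).getD vencedor 0)).map (fun js => js.1)).length > 1
         then ((none : Option String), (0 : Int))
         else (some vencedor, 1)) := rfl

lemma pv_min?_eq_pfold (ps : List (String × Int)) :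
    PySem.List.min? ps (fun p => p.2) = ps.foldl pvPStep none := by
  unfold PySem.List.min?
  congr 1
  funext a p
  cases a <;> rfl

lemma pv_minfold_aux (g : String → Int) :
    ∀ (ps : List (String × Int)) (acc : Option (String × Int)),
      (∀ p ∈ ps, g p.1 = p.2) → (∀ b, acc = some b → g b.1 = b.2) →
      (ps.map (fun p => p.1)).foldl
        (fun a j => match a with
          | none => some j
          | some m => if g j < g m then some j else some m)
        (acc.map (fun b => b.1))
      = (ps.foldl pvPStep acc).map (fun b => b.1) := by
  intro ps
  induction ps with
  | nil => intro acc _ _; rfl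
  | cons p rest ih =>
    intro acc hg hacc
    have hgp : g p.1 = p.2 := hg p (by simp)
    have hgrest : ∀ q ∈ rest, g q.1 = q.2 := fun q hq => hg q (by simp [hq])
    cases acc with
    | none =>
      simp only [List.map_cons, List.foldl_cons, Option.map_none]
      have := ih (some p) hgrest (by rintro b rfl1; cases rfl1; exact hgp)
      simpa [pvPStep] using this
    | some b =>
      have hgb : g b.1 = b.2 := hacc b rfl
      simp only [List.map_cons, List.foldl_cons, Option.map_some]
      rw [hgp, hgb]
      by_cases hlt : p.2 < b.2
      · simp only [hlt, pvPStep]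
        exact ih (some p) hgrest (by rintro c rfl1; cases rfl1; exact hgp)
      · simp only [if_neg hlt, pvPStep]
        exact ih (some b) hgrest (by rintro c rfl1; cases rfl1; exact hgb)

lemma pv_bfold_char (ps : List (String × Int)) :
    ps.foldl pvG ((none : Option (String × Int)), (0 : Int)) =
      (ps.foldl pvPStep none,
       match ps.foldl pvPStep none with
       | none => 0
       | some b => ((ps.countP (fun p => p.2 == b.2) : Nat) : Int)) := by
  induction ps using List.reverseRecOn with
  | nil => rfl
  | append_singleton ps x ih =>
    rw [List.foldl_append, List.foldl_append, ih]
    cases h : ps.foldl pvPStep none with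
    | none =>
      have hps : ps = [] :=
        (PySem.List.min?_eq_none_iff ps (fun p : String × Int => p.2)).mp
          ((pv_min?_eq_pfold ps).trans h)
      subst hps
      simp [pvG, pvPStep]
    | some b =>
      have hmin : ∀ y ∈ ps, b.2 ≤ y.2 := by
        intro y hy
        exact PySem.List.min?_isMin ((pv_min?_eq_pfold ps).trans h) y hy
      by_cases hlt : x.2 < b.2
      · have hz : ps.countP (fun p => p.2 == x.2) = 0 := by
          rw [List.countP_eq_zero]
          intro a ha hax
          have := hmin a ha
          simp only [beq_iff_eq] at hax
          omega
        simp [pvG, pvPStep, hlt, List.countP_append, hz]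
      · by_cases heq : x.2 = b.2
        · simp [pvG, pvPStep, List.countP_append, heq]
        · have hne : (x.2 == b.2) = false := by simp [heq]
          simp [pvG, pvPStep, hlt, hne, List.countP_append]

lemma pv_alt_eq_pairs (maos : List (String × List (Int × Int))) :
    calcular_pontuacao_travamento_alt maos =
      (match (pvPairs maos).foldl pvG ((none : Option (String × Int)), (0 : Int)) with
       | (none, _) => (none, 0)
       | (some b, t) => if t > 1 then (none, 0) else (some b.1, 1)) := by
  unfold calcular_pontuacao_travamento_alt pvPairs
  rw [List.foldl_map]
  rfl

-- ===== VERDICT (by name: the statement is the Claim_ definition above) =====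
theorem calcular_pontuacao_travamento_spec : Claim_equal_calcular_pontuacao_travamento := by
  intro maos _ hpre
  obtain ⟨hne, hnd⟩ := hpre
  unfold Spec_calcular_pontuacao_travamento
  have hitems : (pvD maos).items = pvPairs maos := by
    unfold pvD
    rw [PySem.Dict.items_foldl_insert_fresh maos (fun jm => jm.1) (fun jm => pvHandSum jm.2)
      PySem.Dict.empty (fun a _ => PySem.Dict.contains_empty _) hnd]
    simp [pvPairs, PySem.Dict.empty]
  have hkeys : (pvD maos).keys = (pvPairs maos).map (fun p => p.1) := by
    simp [PySem.Dict.keys, hitems]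
  have hkeysnd : (pvD maos).keys.Nodup := by
    rw [hkeys]
    simpa [pvPairs, List.map_map, Function.comp] using hnd
  have hg : ∀ p ∈ pvPairs maos, (pvD maos).getD p.1 0 = p.2 := by
    intro p hp
    exact PySem.Dict.getD_of_mem_items (pvD maos) (by rw [hitems]; exact hp) hkeysnd 0
  have hminkey : PySem.List.min? (pvD maos).keys (fun j => (pvD maos).getD j 0)
      = ((pvPairs maos).foldl pvPStep none).map (fun b => b.1) := by
    rw [hkeys]
    have h0 : ∀ b : String × Int, (none : Option (String × Int)) = some b →
        (pvD maos).getD b.1 0 = b.2 := by intro b h; cases h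
    have := pv_minfold_aux (fun j => (pvD maos).getD j 0) (pvPairs maos) none hg h0
    rw [← this]
    unfold PySem.List.min?
    simp only [Option.map_none]
    congr 1
    funext a j
    cases a <;> rfl
  have hnonempty : pvPairs maos ≠ [] := by
    simp [pvPairs, hne]
  obtain ⟨b, hb⟩ : ∃ b, (pvPairs maos).foldl pvPStep none = some b := by
    cases hcase : (pvPairs maos).foldl pvPStep none with
    | none =>
      exact absurd ((PySem.List.min?_eq_none_iff (pvPairs maos)
        (fun p : String × Int => p.2)).mp ((pv_min?_eq_pfold _).trans hcase)) hnonempty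
    | some b => exact ⟨b, rfl⟩
  have hbmem : b ∈ pvPairs maos :=
    PySem.List.min?_mem ((pv_min?_eq_pfold _).trans hb)
  have hgb : (pvD maos).getD b.1 0 = b.2 := hg b hbmem
  rw [pv_alt_eq_pairs, pv_bfold_char, hb, pv_a_eq, hminkey, hb]
  simp only [Option.map_some]
  rw [hitems, hgb]
  have hlen : (((pvPairs maos).filter (fun js => js.2 == b.2)).map (fun js => js.1)).length
      = (pvPairs maos).countP (fun p => p.2 == b.2) := by
    simp [List.countP_eq_length_filter]
  rw [hlen]
  by_cases hc : 1 < (pvPairs maos).countP (fun p => p.2 == b.2)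
  · have hc2 : (1 : Int) < ((pvPairs maos).countP (fun p => p.2 == b.2) : Int) := by
      exact_mod_cast hc
    simp [hc, hc2]
  · have hc2 : ¬ (1 : Int) < ((pvPairs maos).countP (fun p => p.2 == b.2) : Int) := by
      exact_mod_cast hc
    simp [hc, hc2]

theorem calcular_pontuacao_travamento_raises : Claim_raises_calcular_pontuacao_travamento := by
  unfold Claim_raises_calcular_pontuacao_travamento
  constructor
  · intro maos _ hr hpre
    exact hpre.1 hr
  · exact ⟨by decide, by decide, by decide⟩

theorem calcular_pontuacao_travamento_raises_witness_ok :
    calcular_pontuacao_travamento_alt pvRaiseWitness_calcular_pontuacao_travamento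
      = pvRaiseWitnessOut_calcular_pontuacao_travamento :=
  calcular_pontuacao_travamento_raises.2.2.2
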